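-- pv_equiv track=rewrite | github.com/Nubuki-all/Tg2Wa-Bridge | bridge_bot/utils/msg_utils.py | whatsapp_md_to_telegram_md
-- ===== SOURCE A (Python) =====
-- def process_line(line):
--     if not line:
--         return line
--
--     whitespace = " \t"
--     formatting_chars = ["*", "_", "~"]
--     stacks = {char: [] for char in formatting_chars}
--     paired_indices = set()
--
--     for i, char in enumerate(line):
--         if char not in formatting_chars:
--             continue
--
--         is_opening = False
--         is_closing = False
--
--         # Check opening conditions
--         if i == 0:
--             if i < len(line) - 1 and line[i + 1] not in whitespace:
--                 is_opening = True
--         else: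
--             prev_char = line[i - 1]
--             if (
--                 prev_char in whitespace
--                 or prev_char in formatting_chars
--                 or not prev_char.isalnum()
--             ):
--                 if i < len(line) - 1 and line[i + 1] not in whitespace:
--                     is_opening = True
--
--         # Check closing conditions
--         if i == len(line) - 1:
--             if i > 0 and line[i - 1] not in whitespace:
--                 is_closing = True
--         else:
--             next_char = line[i + 1]
--             if (
--                 next_char in whitespace
--                 or next_char in formatting_chars
--                 or not next_char.isalnum()
--             ):
--                 if i > 0 and line[i - 1] not in whitespace:
--                     is_closing = True
--
--         if char in formatting_chars:
--             if is_closing and stacks[char]: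
--                 open_index = stacks[char].pop()
--                 substr = line[open_index + 1 : i]
--                 if any(c not in whitespace for c in substr):
--                     paired_indices.add(open_index)
--                     paired_indices.add(i)
--             elif is_opening:
--                 stacks[char].append(i)
--
--     new_line_parts = []
--     i = 0
--     n = len(line)
--     while i < n:
--         if line[i] in formatting_chars and i in paired_indices:
--             new_line_parts.append(line[i] * 2)
--             i += 1
--         elif line[i] in formatting_chars:
--             j = i
--             while j < n and line[j] == line[i] and (j not in paired_indices):
--                 j += 1
--             run = j - i
--             for k in range(run):
--                 new_line_parts.append(line[i])
--                 if k < run - 1: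
--                     new_line_parts.append(" ")
--             i = j
--         else:
--             new_line_parts.append(line[i])
--             i += 1
--
--     return "".join(new_line_parts)
--
-- def whatsapp_md_to_telegram_md(message):
--     lines = message.split("\n")
--     in_code_block = False
--     output_lines = []
--
--     for line in lines:
--         stripped_line = line.strip()
--         if stripped_line.startswith("```") and not in_code_block:
--             in_code_block = True
--             output_lines.append(line)
--         elif in_code_block and stripped_line.startswith("```"):
--             in_code_block = False
--             output_lines.append(line)
--         elif in_code_block:
--             output_lines.append(line)
--         else:
--             processed_line = process_line(line)
--             output_lines.append(processed_line)
--
--     return "\n".join(output_lines)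
-- ===== SOURCE B (Python) =====
-- WS = " \t"
-- FMT = "*_~"
--
--
-- def _boundary(c):
--     # an edge of the line, or a char that cannot be part of a word
--     return c is None or c in WS or c in FMT or not c.isalnum()
--
--
-- def _occurrences(line):
--     # sliding windows (prev, char, next) with None at both edges,
--     # kept only at formatting characters, each tagged opening/closing
--     prevs = [None] + list(line[:-1])
--     nexts = list(line[1:]) + [None]
--     occ = []
--     for i, (p, c, x) in enumerate(zip(prevs, line, nexts)):
--         if c in FMT:
--             opening = x is not None and x not in WS and _boundary(p)
--             closing = p is not None and p not in WS and _boundary(x)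
--             occ.append((i, c, opening, closing))
--     return occ
--
--
-- def _pair(occ, pre):
--     # one stack per marker kind; pre is the running count of
--     # non-whitespace chars, so "marked span is non-blank" is a subtraction
--     stars, unders, tildes = [], [], []
--     paired = set()
--     for i, c, opening, closing in occ:
--         stk = stars if c == "*" else unders if c == "_" else tildes
--         if closing and stk:
--             o = stk.pop()
--             if pre[i] > pre[o + 1]:
--                 paired.add(o)
--                 paired.add(i)
--         elif opening:
--             stk.append(i)
--     return paired
--
--
-- def _convert(line):
--     pre = [0]
--     for c in line:
--         pre.append(pre[-1] + (c not in WS))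
--     paired = _pair(_occurrences(line), pre)
--     nexts = list(line[1:]) + [None]
--     out = []
--     for i, (c, x) in enumerate(zip(line, nexts)):
--         if c not in FMT:
--             out.append(c)
--         elif i in paired:
--             out.append(c + c)
--         else:
--             out.append(c)
--             if x == c and (i + 1) not in paired:
--                 out.append(" ")
--     return "".join(out)
--
--
-- def whatsapp_md_to_telegram_md(message):
--     out = []
--     in_code = False
--     for line in message.split("\n"):
--         if line.strip().startswith("```"):
--             in_code = not in_code
--             out.append(line)
--         else:
--             out.append(line if in_code else _convert(line))
--     return "\n".join(out)
-- ===== Notes on version B (the rewrite author's own statement) =====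
-- stated objective: alternative
-- what changed: Per line, B first classifies only the marker occurrences from (prev,char,next) windows into an occurrence list with opening/closing flags, matches them with three plain per-marker stacks instead of A's dict of stacks, replaces A's per-closing substring non-whitespace scan by a running prefix count queried by one comparison, and renders in a single zip-with-successor pass instead of A's while-loop with an inner run scan; the three-branch code-fence state machine becomes a toggle.
import Mathlib
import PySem

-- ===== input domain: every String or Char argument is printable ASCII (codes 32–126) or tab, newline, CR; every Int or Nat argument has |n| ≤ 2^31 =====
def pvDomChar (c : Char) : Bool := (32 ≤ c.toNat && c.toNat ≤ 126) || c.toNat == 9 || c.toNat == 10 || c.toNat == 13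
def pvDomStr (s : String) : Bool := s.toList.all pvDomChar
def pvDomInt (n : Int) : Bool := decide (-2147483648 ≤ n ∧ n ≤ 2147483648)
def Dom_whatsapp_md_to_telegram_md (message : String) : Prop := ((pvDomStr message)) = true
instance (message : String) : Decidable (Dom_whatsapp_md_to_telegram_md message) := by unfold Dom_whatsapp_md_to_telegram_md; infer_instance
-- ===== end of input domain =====

-- B replaces A's per-line machinery wholesale: a single classification pass over
-- (prev, char, next) windows collects only the formatting-marker occurrences with their
-- opening/closing flags, three plain stacks (one per marker kind) match them, a running
-- non-whitespace count queried by comparison replaces the substring scan done for each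
-- closing marker, and one zip-with-successor output pass replaces the while-loop with an
-- inner run scan (objective: alternative).

-- ===== PORT A =====
-- the constant strings both versions share: whitespace = " \t", formatting_chars = "*_~"
def pvWs (c : Char) : Bool := c == ' ' || c == '\t'
def pvFmt (c : Char) : Bool := c == '*' || c == '_' || c == '~'
-- stacks = {char: [] for char in formatting_chars}
def pvInitStacks : PySem.Dict Char (List Nat) :=
  ((PySem.Dict.empty.insert '*' []).insert '_' []).insert '~' []

-- A's "Check opening conditions" block (nested ifs, in A's order; all reads in range)
def pvOpeningA (line : List Char) (i : Nat) : Bool :=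
  if i = 0 then
    decide (i + 1 < line.length) && !pvWs (line.getD (i + 1) ' ')
  else
    if pvWs (line.getD (i - 1) ' ') || pvFmt (line.getD (i - 1) ' ') ||
        !PySem.Chars.isalnum (line.getD (i - 1) ' ') then
      decide (i + 1 < line.length) && !pvWs (line.getD (i + 1) ' ')
    else false

-- A's "Check closing conditions" block
def pvClosingA (line : List Char) (i : Nat) : Bool :=
  if i = line.length - 1 then
    decide (0 < i) && !pvWs (line.getD (i - 1) ' ')
  else
    if pvWs (line.getD (i + 1) ' ') || pvFmt (line.getD (i + 1) ' ') ||
        !PySem.Chars.isalnum (line.getD (i + 1) ' ') then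
      decide (0 < i) && !pvWs (line.getD (i - 1) ' ')
    else false

-- the body of A's `for i, char in enumerate(line)` pairing loop
def pvStepA (line : List Char) (st : PySem.Dict Char (List Nat) × PySem.Set Nat) (i : Nat) :
    PySem.Dict Char (List Nat) × PySem.Set Nat :=
  let c := line.getD i ' '
  if !pvFmt c then st
  else
    let stk := st.1.getD c []
    if pvClosingA line i && !stk.isEmpty then
      let o := stk.getLastD 0              -- open_index = stacks[char].pop()
      let stacks' := st.1.insert c stk.dropLast
      -- substr = line[open_index + 1 : i]; any(c not in whitespace for c in substr)
      if (PySem.List.slice line (some ((o + 1 : Nat) : Int)) (some ((i : Nat) : Int))).any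
          (fun ch => !pvWs ch) then
        (stacks', (st.2.add o).add i)
      else (stacks', st.2)
    else if pvOpeningA line i then (st.1.insert c (stk ++ [i]), st.2)
    else st

-- inner `while j < n and line[j] == line[i] and (j not in paired_indices): j += 1`
def pvRunEndA (line : List Char) (paired : PySem.Set Nat) (c : Char) (j : Nat) : Nat :=
  if h : j < line.length ∧ line.getD j ' ' = c ∧ ¬ j ∈ paired then
    pvRunEndA line paired c (j + 1)
  else j
termination_by line.length - j
decreasing_by omega

lemma pvRunEndA_ge_aux (line : List Char) (paired : PySem.Set Nat) (c : Char) :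
    ∀ (m j : Nat), line.length - j ≤ m → j ≤ pvRunEndA line paired c j := by
  intro m
  induction m with
  | zero =>
    intro j hm
    rw [pvRunEndA]
    split
    · next h => omega
    · exact Nat.le_refl j
  | succ m ih =>
    intro j hm
    rw [pvRunEndA]
    split
    · next h => have := ih (j + 1) (by omega); omega
    · exact Nat.le_refl j

lemma pvRunEndA_ge (line : List Char) (paired : PySem.Set Nat) (c : Char) (j : Nat) :
    j ≤ pvRunEndA line paired c j :=
  pvRunEndA_ge_aux line paired c (line.length - j) j (Nat.le_refl _)

lemma pvRunEndA_gt (line : List Char) (paired : PySem.Set Nat) (c : Char) (i : Nat)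
    (h1 : i < line.length) (h2 : line.getD i ' ' = c) (h3 : ¬ i ∈ paired) :
    i < pvRunEndA line paired c i := by
  rw [pvRunEndA, dif_pos ⟨h1, h2, h3⟩]
  have := pvRunEndA_ge line paired c (i + 1)
  omega

-- `for k in range(run): parts.append(line[i]); if k < run - 1: parts.append(" ")`
def pvEmitRunA (c : Char) (run : Nat) : List Char :=
  (List.range run).foldl (fun acc k => acc ++ ([c] ++ if k < run - 1 then [' '] else [])) []

-- A's output `while i < n` loop (parts are accumulated and joined by "")
def pvBuildA (line : List Char) (paired : PySem.Set Nat) (i : Nat) : List Char :=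
  if h : i < line.length then
    let c := line.getD i ' '
    if hp : pvFmt c && decide (i ∈ paired) then
      c :: c :: pvBuildA line paired (i + 1)
    else if hf : pvFmt c then
      pvEmitRunA c (pvRunEndA line paired c i - i) ++ pvBuildA line paired (pvRunEndA line paired c i)
    else
      c :: pvBuildA line paired (i + 1)
  else []
termination_by line.length - i
decreasing_by
  · omega
  · have hnp : ¬ i ∈ paired := by
      by_contra hip
      simp [hf, hip] at hp
    have := pvRunEndA_gt line paired (line.getD i ' ') i h rfl hnp
    omega
  · omega

def pvProcessLineA (line : List Char) : List Char :=
  if line.isEmpty then line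
  else
    let st := (List.range line.length).foldl (pvStepA line) (pvInitStacks, PySem.Set.ofList [])
    pvBuildA line st.2 0

-- A's code-fence loop body (three-branch state machine over (in_code_block, output_lines))
def pvFenceStepA (st : Bool × List (List Char)) (line : List Char) : Bool × List (List Char) :=
  let stripped := PySem.Chars.strip line
  if PySem.Chars.startswith stripped ['`', '`', '`'] && !st.1 then (true, st.2 ++ [line])
  else if st.1 && PySem.Chars.startswith stripped ['`', '`', '`'] then (false, st.2 ++ [line])
  else if st.1 then (st.1, st.2 ++ [line])
  else (st.1, st.2 ++ [pvProcessLineA line])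

def whatsapp_md_to_telegram_md (message : String) : String :=
  String.ofList (PySem.Chars.join ['\n']
    (((PySem.Chars.splitOn message.toList ['\n']).foldl pvFenceStepA (false, [])).2))

-- ===== PORT B =====
-- pre = [0]; for c in line: pre.append(pre[-1] + (c not in WS))
def pvPreB (line : List Char) : List Int :=
  line.foldl (fun acc c => acc ++ [acc.getLastD 0 + (if !pvWs c then 1 else 0)]) [0]

-- _boundary(c): an edge of the line (None), or a char that cannot be part of a word
def pvBoundary (o : Option Char) : Bool :=
  match o with
  | none => true
  | some p => pvWs p || pvFmt p || !PySem.Chars.isalnum p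

-- _occurrences: enumerate(zip([None]+line[:-1], line, line[1:]+[None])), keep marker chars
def pvOccs (line : List Char) : List (Nat × Char × Bool × Bool) :=
  ((List.zip (none :: line.dropLast.map some)
      (List.zip line ((line.drop 1).map some ++ [none]))).zipIdx).filterMap
    (fun w =>
      if pvFmt w.1.2.1 then
        some (w.2, w.1.2.1,
          (match w.1.2.2 with | none => false | some xc => !pvWs xc) && pvBoundary w.1.1,
          (match w.1.1 with | none => false | some pc => !pvWs pc) && pvBoundary w.1.2.2)
      else none)

-- _pair's loop body: three stacks (stars, unders, tildes) and the paired set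
def pvPairStep (pre : List Int) (st : (List Nat × List Nat × List Nat) × PySem.Set Nat)
    (e : Nat × Char × Bool × Bool) : (List Nat × List Nat × List Nat) × PySem.Set Nat :=
  let i := e.1
  let c := e.2.1
  let stk := if c == '*' then st.1.1 else if c == '_' then st.1.2.1 else st.1.2.2
  if e.2.2.2 && !stk.isEmpty then
    let o := stk.getLastD 0
    let stks := if c == '*' then (stk.dropLast, st.1.2.1, st.1.2.2)
      else if c == '_' then (st.1.1, stk.dropLast, st.1.2.2)
      else (st.1.1, st.1.2.1, stk.dropLast)
    if pre.getD i 0 > pre.getD (o + 1) 0 then (stks, (st.2.add o).add i) else (stks, st.2)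
  else if e.2.2.1 then
    (if c == '*' then (stk ++ [i], st.1.2.1, st.1.2.2)
      else if c == '_' then (st.1.1, stk ++ [i], st.1.2.2)
      else (st.1.1, st.1.2.1, stk ++ [i]), st.2)
  else st

def pvPairB (occ : List (Nat × Char × Bool × Bool)) (pre : List Int) : PySem.Set Nat :=
  (occ.foldl (pvPairStep pre) (([], [], []), PySem.Set.empty)).2

-- the rendering loop: for i, (c, x) in enumerate(zip(line, line[1:]+[None]))
def pvRenderB (line : List Char) (paired : PySem.Set Nat) : List Char :=
  ((List.zip line ((line.drop 1).map some ++ [none])).zipIdx).foldl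
    (fun out w =>
      if !pvFmt w.1.1 then out ++ [w.1.1]
      else if w.2 ∈ paired then out ++ [w.1.1, w.1.1]
      else (out ++ [w.1.1]) ++
        (if (w.1.2 == some w.1.1) && !decide ((w.2 + 1) ∈ paired) then [' '] else []))
    []

def pvProcessLineB (line : List Char) : List Char :=
  pvRenderB line (pvPairB (pvOccs line) (pvPreB line))

-- B's code-fence loop body: a toggle over (out, in_code)
def pvFenceStepB (st : List (List Char) × Bool) (line : List Char) : List (List Char) × Bool :=
  if PySem.Chars.startswith (PySem.Chars.strip line) ['`', '`', '`'] then (st.1 ++ [line], !st.2)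
  else (st.1 ++ [if st.2 then line else pvProcessLineB line], st.2)

def whatsapp_md_to_telegram_md_alt (message : String) : String :=
  String.ofList (PySem.Chars.join ['\n']
    (((PySem.Chars.splitOn message.toList ['\n']).foldl pvFenceStepB ([], false)).1))

-- ===== PRECONDITION & SPEC =====
def Spec_whatsapp_md_to_telegram_md (message : String) (out : String) : Prop := out = whatsapp_md_to_telegram_md_alt message
instance (message : String) (out : String) : Decidable (Spec_whatsapp_md_to_telegram_md message out) := by unfold Spec_whatsapp_md_to_telegram_md; infer_instance

-- ===== CLAIM (what is proved, stated in full; the proofs are below) =====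
def Claim_equal_whatsapp_md_to_telegram_md : Prop := ∀ (message : String), Dom_whatsapp_md_to_telegram_md message → Spec_whatsapp_md_to_telegram_md message (whatsapp_md_to_telegram_md message)

-- ===== LEMMAS AND PROOFS =====

-- index-based views of the window components and of B's occurrence classification
def pvPrevO (line : List Char) (i : Nat) : Option Char :=
  if i = 0 then none else some (line.getD (i - 1) ' ')

def pvNextO (line : List Char) (i : Nat) : Option Char :=
  if i + 1 < line.length then some (line.getD (i + 1) ' ') else none

def pvOpenIx (line : List Char) (i : Nat) : Bool :=
  (match pvNextO line i with | none => false | some xc => !pvWs xc) && pvBoundary (pvPrevO line i)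

def pvClosIx (line : List Char) (i : Nat) : Bool :=
  (match pvPrevO line i with | none => false | some pc => !pvWs pc) && pvBoundary (pvNextO line i)

def pvClassIx (line : List Char) (i : Nat) : Option (Nat × Char × Bool × Bool) :=
  if pvFmt (line.getD i ' ') then
    some (i, line.getD i ' ', pvOpenIx line i, pvClosIx line i)
  else none

-- per-index piece of B's rendering loop
def pvPieceB (line : List Char) (paired : PySem.Set Nat) (i : Nat) : List Char :=
  let c := line.getD i ' '
  if pvFmt c then
    if i ∈ paired then [c, c]
    else [c] ++
      (if decide (i + 1 < line.length) && (line.getD (i + 1) ' ' == c) &&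
          !decide ((i + 1) ∈ paired) then [' '] else [])
  else [c]

-- pvPreB is the table of prefix non-whitespace counts
lemma pvPreB_eq (line : List Char) :
    pvPreB line = (List.range (line.length + 1)).map
      (fun k => (((line.take k).countP (fun c => !pvWs c) : Nat) : Int)) := by
  induction line using List.reverseRecOn with
  | nil => simp [pvPreB]
  | append_singleton l x ih =>
    have hstep : pvPreB (l ++ [x])
        = pvPreB l ++ [(pvPreB l).getLastD 0 + (if !pvWs x then 1 else 0)] := by
      rw [pvPreB, pvPreB, List.foldl_append]
      simp
    have hlast : (pvPreB l).getLastD 0 = ((l.countP (fun c => !pvWs c) : Nat) : Int) := by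
      rw [ih, List.range_succ, List.map_append]
      simp
    rw [hstep, hlast, ih]
    have hlen : (l ++ [x]).length + 1 = (l.length + 1) + 1 := by simp
    rw [hlen, List.range_succ (n := l.length + 1), List.map_append]
    congr 1
    · apply List.map_congr_left
      intro k hk
      rw [List.mem_range] at hk
      rw [List.take_append_of_le_length (by omega)]
    · have ht : (l ++ [x]).take (l.length + 1) = l ++ [x] := by
        apply List.take_of_length_le; simp
      simp only [List.map_cons, List.map_nil, ht, List.countP_append]
      cases h : pvWs x <;> simp [h]

lemma pvPreB_getD (line : List Char) (k : Nat) (hk : k ≤ line.length) :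
    (pvPreB line).getD k 0 = (((line.take k).countP (fun c => !pvWs c) : Nat) : Int) := by
  rw [pvPreB_eq]
  exact PySem.List.getD_map_range _ _ _ _ (by omega)

-- the O(1) running-count comparison equals A's substring scan
lemma pvSliceAnyEq (line : List Char) (o i : Nat) (ho : o < i) (hi : i ≤ line.length) :
    (PySem.List.slice line (some ((o + 1 : Nat) : Int)) (some ((i : Nat) : Int))).any
        (fun ch => !pvWs ch)
      = decide ((pvPreB line).getD i 0 > (pvPreB line).getD (o + 1) 0) := by
  rw [PySem.List.slice_natCast, pvPreB_getD line i hi, pvPreB_getD line (o + 1) (by omega)]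
  have htake : line.take i = line.take (o + 1) ++ (line.drop (o + 1)).take (i - (o + 1)) := by
    rw [← List.take_add]
    congr 1
    omega
  rw [htake, List.countP_append]
  rcases h : (List.take (i - (o + 1)) (List.drop (o + 1) line)).any (fun ch => !pvWs ch) with _ | _
  · rw [List.any_eq_false] at h
    have : (List.take (i - (o + 1)) (List.drop (o + 1) line)).countP (fun ch => !pvWs ch) = 0 := by
      rw [List.countP_eq_zero]
      intro a ha
      simpa using h a ha
    rw [this]
    simp
  · rw [List.any_eq_true] at h
    obtain ⟨a, ha, hpa⟩ := h
    have : 0 < (List.take (i - (o + 1)) (List.drop (o + 1) line)).countP (fun ch => !pvWs ch) :=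
      List.countP_pos_iff.mpr ⟨a, ha, hpa⟩
    symm
    rw [decide_eq_true_iff]
    push_cast
    omega

-- A's nested opening/closing conditions equal B's window-based flags (for an in-range index)
lemma pvOpening_eq (line : List Char) (i : Nat) :
    pvOpeningA line i = pvOpenIx line i := by
  rw [pvOpeningA, pvOpenIx]
  by_cases hn : i + 1 < line.length <;> by_cases h0 : i = 0
  · subst h0
    have hn' : 1 < line.length := by simpa using hn
    simp [pvPrevO, pvNextO, pvBoundary, hn']
  · rw [if_neg h0]
    simp only [pvPrevO, pvNextO, if_neg h0, if_pos hn]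
    generalize line.getD (i - 1) ' ' = p
    cases hw : pvWs p <;> cases hfm : pvFmt p <;> cases ha : PySem.Chars.isalnum p <;>
      simp [pvBoundary, hw, hfm, ha, hn]
  · subst h0
    have hn' : ¬ 1 < line.length := by simpa using hn
    simp [pvPrevO, pvNextO, pvBoundary, hn']
  · rw [if_neg h0]
    simp only [pvPrevO, pvNextO, if_neg h0, if_neg hn]
    generalize line.getD (i - 1) ' ' = p
    cases hw : pvWs p <;> cases hfm : pvFmt p <;> cases ha : PySem.Chars.isalnum p <;>
      simp [pvBoundary, hw, hfm, ha, hn]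

lemma pvClosing_eq (line : List Char) (i : Nat) (hi : i < line.length) :
    pvClosingA line i = pvClosIx line i := by
  rw [pvClosingA, pvClosIx]
  by_cases h0 : i = line.length - 1
  · have h1 : ¬ (i + 1 < line.length) := by omega
    rw [if_pos h0]
    by_cases hz : i = 0
    · simp [pvPrevO, pvNextO, pvBoundary, hz]
    · simp [pvPrevO, pvNextO, pvBoundary, hz, h1, Nat.pos_of_ne_zero hz]
  · have h1 : i + 1 < line.length := by omega
    rw [if_neg h0]
    simp only [pvPrevO, pvNextO, if_pos h1]
    generalize line.getD (i + 1) ' ' = q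
    by_cases hz : i = 0
    · cases hw : pvWs q <;> cases hfm : pvFmt q <;> cases ha : PySem.Chars.isalnum q <;>
        simp [pvBoundary, hz, hw, hfm, ha]
    · cases hw : pvWs q <;> cases hfm : pvFmt q <;> cases ha : PySem.Chars.isalnum q <;>
        simp [pvBoundary, hz, hw, hfm, ha, Nat.pos_of_ne_zero hz]

-- the zipped window list, indexed
lemma pvWindows_eq (line : List Char) :
    (List.zip (none :: line.dropLast.map some)
        (List.zip line ((line.drop 1).map some ++ [none]))).zipIdx
      = (List.range line.length).map
          (fun i => ((pvPrevO line i, (line.getD i ' ', pvNextO line i)), i)) := by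
  apply List.ext_getElem
  · simp
    omega
  · intro i h1 h2
    have hi : i < line.length := by
      simp at h2
      exact h2
    rw [List.getElem_zipIdx, List.getElem_zip, List.getElem_zip, List.getElem_map,
      List.getElem_range]
    refine Prod.ext (Prod.ext ?_ (Prod.ext ?_ ?_)) (by simp)
    · -- prev component
      rcases i with _ | k
      · simp [pvPrevO]
      · simp only [List.getElem_cons_succ, List.getElem_map, List.getElem_dropLast, pvPrevO]
        rw [if_neg (by omega)]
        rw [List.getD_eq_getElem?_getD,
          List.getElem?_eq_getElem (by omega : k + 1 - 1 < line.length)]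
        simp
    · rw [List.getD_eq_getElem?_getD, List.getElem?_eq_getElem hi]
      simp
    · -- next component
      rw [List.getElem_append]
      by_cases hlt : i + 1 < line.length
      · rw [dif_pos (by simp; omega)]
        simp only [List.getElem_map, List.getElem_drop, pvNextO, if_pos hlt]
        rw [List.getD_eq_getElem?_getD, List.getElem?_eq_getElem hlt]
        simp [show 1 + i = i + 1 from by omega]
      · rw [dif_neg (by simp; omega)]
        simp [pvNextO, hlt]

-- B's occurrence list is the index-based classification over the whole range
lemma pvOccs_eq (line : List Char) :
    pvOccs line = (List.range line.length).filterMap (pvClassIx line) := by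
  rw [pvOccs, pvWindows_eq, List.filterMap_map]
  congr 1

-- invariant: every stacked index is below the current loop index
def pvInv (st : PySem.Dict Char (List Nat) × PySem.Set Nat) (i : Nat) : Prop :=
  ∀ c : Char, ∀ o ∈ st.1.getD c [], o < i

-- the dict state of A corresponds to B's three stacks, and the paired sets agree
def pvRel (stA : PySem.Dict Char (List Nat) × PySem.Set Nat)
    (stB : (List Nat × List Nat × List Nat) × PySem.Set Nat) : Prop :=
  stA.1.getD '*' [] = stB.1.1 ∧ stA.1.getD '_' [] = stB.1.2.1 ∧
    stA.1.getD '~' [] = stB.1.2.2 ∧ stA.2 = stB.2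

lemma pvGetLastD_mem (l : List Nat) (h : l ≠ []) : l.getLastD 0 ∈ l := by
  rw [List.getLastD_eq_getLast?, List.getLast?_eq_some_getLast h]
  simp only [Option.getD_some]
  exact List.getLast_mem h

lemma pvClassIx_none (line : List Char) (stA : PySem.Dict Char (List Nat) × PySem.Set Nat)
    (i : Nat) (h : pvClassIx line i = none) : pvStepA line stA i = stA := by
  have hf : pvFmt (line.getD i ' ') = false := by
    rcases hb : pvFmt (line.getD i ' ') with _ | _
    · rfl
    · rw [pvClassIx, if_pos hb] at h
      exact absurd h (by simp)
  simp only [pvStepA]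
  rw [if_pos (show (!pvFmt (line.getD i ' ')) = true by rw [hf]; rfl)]

lemma pvStep_rel (line : List Char) (stA : PySem.Dict Char (List Nat) × PySem.Set Nat)
    (stB : (List Nat × List Nat × List Nat) × PySem.Set Nat) (i : Nat)
    (e : Nat × Char × Bool × Bool) (hi : i < line.length) (he : pvClassIx line i = some e)
    (hinv : pvInv stA i) (hrel : pvRel stA stB) :
    pvRel (pvStepA line stA i) (pvPairStep (pvPreB line) stB e) := by
  obtain ⟨h1, h2, h3, h4⟩ := hrel
  have hf : pvFmt (line.getD i ' ') = true := by
    rcases hb : pvFmt (line.getD i ' ') with _ | _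
    · rw [pvClassIx, if_neg (by rw [hb]; simp)] at he
      exact absurd he (by simp)
    · rfl
  rw [pvClassIx, if_pos hf] at he
  obtain rfl : e = (i, line.getD i ' ', pvOpenIx line i, pvClosIx line i) :=
    (Option.some_inj.mp he).symm
  simp only [pvStepA, hf, Bool.not_true, Bool.false_eq_true, if_false, pvPairStep]
  rw [← pvClosing_eq line i hi, ← pvOpening_eq line i]
  have hc3 : line.getD i ' ' = '*' ∨ line.getD i ' ' = '_' ∨ line.getD i ' ' = '~' := by
    rw [pvFmt] at hf
    rcases Bool.or_eq_true _ _ |>.mp hf with h | h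
    · rcases Bool.or_eq_true _ _ |>.mp h with h | h
      · exact Or.inl (by simpa using h)
      · exact Or.inr (Or.inl (by simpa using h))
    · exact Or.inr (Or.inr (by simpa using h))
  have hsel : (if (line.getD i ' ' == '*') = true then stB.1.1
      else if (line.getD i ' ' == '_') = true then stB.1.2.1 else stB.1.2.2)
        = stA.1.getD (line.getD i ' ') [] := by
    rcases hc3 with hc | hc | hc <;> rw [hc] <;> simp [h1, h2, h3]
  rw [hsel]
  have hup : ∀ (v : List Nat) (s : PySem.Set Nat),
      pvRel (stA.1.insert (line.getD i ' ') v, s)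
        ((if (line.getD i ' ' == '*') = true then (v, stB.1.2.1, stB.1.2.2)
          else if (line.getD i ' ' == '_') = true then (stB.1.1, v, stB.1.2.2)
          else (stB.1.1, stB.1.2.1, v)), s) := by
    intro v s
    rcases hc3 with hc | hc | hc <;> rw [hc] <;>
      refine ⟨?_, ?_, ?_, rfl⟩ <;>
      simp [PySem.Dict.getD_insert, h1, h2, h3]
  by_cases hcl : (pvClosingA line i && !(stA.1.getD (line.getD i ' ') []).isEmpty) = true
  · rw [if_pos hcl, if_pos hcl]
    have hne : stA.1.getD (line.getD i ' ') [] ≠ [] := by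
      have := ((Bool.and_eq_true _ _).mp hcl).2
      simpa using this
    have ho : (stA.1.getD (line.getD i ' ') []).getLastD 0 < i :=
      hinv (line.getD i ' ') _ (pvGetLastD_mem _ hne)
    rw [pvSliceAnyEq line _ i ho (Nat.le_of_lt hi)]
    by_cases hsub : ((pvPreB line).getD i 0 > (pvPreB line).getD
        ((stA.1.getD (line.getD i ' ') []).getLastD 0 + 1) 0)
    · rw [if_pos (decide_eq_true hsub), if_pos hsub, h4]
      exact hup _ _
    · rw [if_neg (by simpa using hsub), if_neg hsub, h4]
      exact hup _ _
  · rw [if_neg hcl, if_neg hcl]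
    by_cases hop : pvOpeningA line i = true
    · rw [if_pos hop, if_pos hop, h4]
      exact hup _ _
    · rw [if_neg hop, if_neg hop]
      exact ⟨h1, h2, h3, h4⟩

lemma pvStepA_inv (line : List Char) (st : PySem.Dict Char (List Nat) × PySem.Set Nat)
    (i : Nat) (hinv : pvInv st i) : pvInv (pvStepA line st i) (i + 1) := by
  intro c o ho
  simp only [pvStepA] at ho
  split at ho
  · exact Nat.lt_succ_of_lt (hinv c o ho)
  · split at ho
    · have hmem : o ∈ ((st.1.insert (line.getD i ' ')
          ((st.1.getD (line.getD i ' ') []).dropLast)).getD c []) := by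
        split at ho <;> simpa using ho
      rw [PySem.Dict.getD_insert] at hmem
      split at hmem
      · exact Nat.lt_succ_of_lt (hinv _ o (List.dropLast_subset _ hmem))
      · exact Nat.lt_succ_of_lt (hinv c o hmem)
    · split at ho
      · simp only at ho
        rw [PySem.Dict.getD_insert] at ho
        split at ho
        · rw [List.mem_append] at ho
          rcases ho with h | h
          · exact Nat.lt_succ_of_lt (hinv _ o h)
          · simp at h
            omega
        · exact Nat.lt_succ_of_lt (hinv c o ho)
      · exact Nat.lt_succ_of_lt (hinv c o ho)

lemma pvFold_rel (line : List Char) : ∀ (k i : Nat), i + k = line.length →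
    ∀ (stA : PySem.Dict Char (List Nat) × PySem.Set Nat)
      (stB : (List Nat × List Nat × List Nat) × PySem.Set Nat),
    pvInv stA i → pvRel stA stB →
    pvRel ((List.range' i k).foldl (pvStepA line) stA)
      (((List.range' i k).filterMap (pvClassIx line)).foldl (pvPairStep (pvPreB line)) stB) := by
  intro k
  induction k with
  | zero => intro i _ stA stB _ hrel; simpa using hrel
  | succ k ih =>
    intro i hik stA stB hinv hrel
    rw [List.range'_succ, List.foldl_cons]
    cases h : pvClassIx line i with
    | none =>
      simp only [List.filterMap_cons, h]
      rw [pvClassIx_none line stA i h] at *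
      exact ih (i + 1) (by omega) _ _
        (by rw [← pvClassIx_none line stA i h]; exact pvStepA_inv line stA i hinv) hrel
    | some e =>
      simp only [List.filterMap_cons, h, List.foldl_cons]
      exact ih (i + 1) (by omega) _ _ (pvStepA_inv line stA i hinv)
        (pvStep_rel line stA stB i e (by omega) h hinv hrel)

lemma pvInitInv : pvInv (pvInitStacks, PySem.Set.ofList []) 0 := by
  intro c o ho
  exfalso
  simp only [pvInitStacks] at ho
  rw [PySem.Dict.getD_insert] at ho
  split at ho
  · simp at ho
  · rw [PySem.Dict.getD_insert] at ho
    split at ho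
    · simp at ho
    · rw [PySem.Dict.getD_insert] at ho
      split at ho
      · simp at ho
      · rw [PySem.Dict.getD_empty] at ho
        simp at ho

lemma pvInitRel : pvRel (pvInitStacks, PySem.Set.ofList []) (([], [], []), PySem.Set.empty) := by
  refine ⟨?_, ?_, ?_, rfl⟩ <;> simp [pvInitStacks, PySem.Dict.getD_insert]

-- the paired sets of the two pairing passes agree
lemma pvPaired_eq (line : List Char) :
    ((List.range line.length).foldl (pvStepA line) (pvInitStacks, PySem.Set.ofList [])).2
      = pvPairB (pvOccs line) (pvPreB line) := by
  rw [pvPairB, pvOccs_eq, List.range_eq_range']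
  exact (pvFold_rel line line.length 0 (by omega) _ _ pvInitInv pvInitRel).2.2.2

-- === rendering ===
-- the emitted run as a flatMap
lemma pvEmitRunA_eq (c : Char) (run : Nat) :
    pvEmitRunA c run = (List.range run).flatMap (fun k => [c] ++ if k < run - 1 then [' '] else []) := by
  rw [pvEmitRunA, PySem.List.foldl_append_eq_flatMap]
  simp

lemma pvEmitRunA_succ (c : Char) (r : Nat) (hr : 0 < r) :
    pvEmitRunA c (r + 1) = [c, ' '] ++ pvEmitRunA c r := by
  rw [pvEmitRunA_eq, pvEmitRunA_eq, List.range_succ_eq_map, List.flatMap_cons, List.flatMap_map]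
  have h0 : (if 0 < r + 1 - 1 then [' '] else []) = [' '] := by
    rw [if_pos (by omega)]
  rw [h0]
  have hcong : ∀ k : Nat, ([c] ++ if k.succ < r + 1 - 1 then [' '] else [])
      = ([c] ++ if k < r - 1 then [' '] else []) := by
    intro k
    congr 1
    by_cases h : k < r - 1
    · rw [if_pos h, if_pos (by omega)]
    · rw [if_neg h, if_neg (by omega)]
  simp only [hcong]
  rfl

lemma pvRunEndA_le_aux (line : List Char) (paired : PySem.Set Nat) (c : Char) :
    ∀ (m j : Nat), line.length - j ≤ m → j ≤ line.length → pvRunEndA line paired c j ≤ line.length := by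
  intro m
  induction m with
  | zero =>
    intro j hm hj
    rw [pvRunEndA]
    split
    · next h => omega
    · exact hj
  | succ m ih =>
    intro j hm hj
    rw [pvRunEndA]
    split
    · next h => exact ih (j + 1) (by omega) (by omega)
    · exact hj

lemma pvRunEndA_le (line : List Char) (paired : PySem.Set Nat) (c : Char) (j : Nat)
    (hj : j ≤ line.length) : pvRunEndA line paired c j ≤ line.length :=
  pvRunEndA_le_aux line paired c (line.length - j) j (Nat.le_refl _) hj

lemma pvRunEndA_mem_aux (line : List Char) (paired : PySem.Set Nat) (c : Char) :
    ∀ (m j : Nat), line.length - j ≤ m →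
    ∀ p, j ≤ p → p < pvRunEndA line paired c j → line.getD p ' ' = c ∧ ¬ p ∈ paired := by
  intro m
  induction m with
  | zero =>
    intro j hm p hp1 hp2
    rw [pvRunEndA] at hp2
    split at hp2
    · next h => omega
    · omega
  | succ m ih =>
    intro j hm p hp1 hp2
    rw [pvRunEndA] at hp2
    split at hp2
    · next h =>
      rcases Nat.eq_or_lt_of_le hp1 with rfl | hlt
      · exact ⟨h.2.1, h.2.2⟩
      · exact ih (j + 1) (by omega) p hlt hp2
    · omega

lemma pvRunEndA_mem (line : List Char) (paired : PySem.Set Nat) (c : Char) (j : Nat) :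
    ∀ p, j ≤ p → p < pvRunEndA line paired c j → line.getD p ' ' = c ∧ ¬ p ∈ paired :=
  pvRunEndA_mem_aux line paired c (line.length - j) j (Nat.le_refl _)

lemma pvRunEndA_stop_aux (line : List Char) (paired : PySem.Set Nat) (c : Char) :
    ∀ (m j : Nat), line.length - j ≤ m →
    pvRunEndA line paired c j = line.length ∨
      line.getD (pvRunEndA line paired c j) ' ' ≠ c ∨ (pvRunEndA line paired c j) ∈ paired ∨
      line.length ≤ pvRunEndA line paired c j := by
  intro m
  induction m with
  | zero =>
    intro j hm
    rw [pvRunEndA]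
    split
    · next h => omega
    · next h =>
      by_cases h1 : j < line.length
      · by_cases h2 : line.getD j ' ' = c
        · right; right; left
          by_contra h3
          exact h ⟨h1, h2, h3⟩
        · right; left; exact h2
      · right; right; right; omega
  | succ m ih =>
    intro j hm
    rw [pvRunEndA]
    split
    · next h => exact ih (j + 1) (by omega)
    · next h =>
      by_cases h1 : j < line.length
      · by_cases h2 : line.getD j ' ' = c
        · right; right; left
          by_contra h3
          exact h ⟨h1, h2, h3⟩
        · right; left; exact h2
      · right; right; right; omega

lemma pvRunEndA_stop (line : List Char) (paired : PySem.Set Nat) (c : Char) (j : Nat) :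
    pvRunEndA line paired c j = line.length ∨
      line.getD (pvRunEndA line paired c j) ' ' ≠ c ∨ (pvRunEndA line paired c j) ∈ paired ∨
      line.length ≤ pvRunEndA line paired c j :=
  pvRunEndA_stop_aux line paired c (line.length - j) j (Nat.le_refl _)

-- a run of unpaired equal formatting chars flattens to A's space-interleaved emission
lemma pvRunPieces (line : List Char) (paired : PySem.Set Nat) (c : Char) (hc : pvFmt c = true) :
    ∀ (r i : Nat), 0 < r → i + r ≤ line.length →
    (∀ t < r, line.getD (i + t) ' ' = c ∧ ¬ (i + t) ∈ paired) →
    (i + r = line.length ∨ line.getD (i + r) ' ' ≠ c ∨ (i + r) ∈ paired) →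
    (List.range' i r).flatMap (pvPieceB line paired) = pvEmitRunA c r := by
  intro r
  induction r with
  | zero => omega
  | succ r ih =>
    intro i _ hle hrun hstop
    have hci : line.getD i ' ' = c := by
      have := hrun 0 (by omega)
      simpa using this.1
    have hpi : ¬ i ∈ paired := by
      have := hrun 0 (by omega)
      simpa using this.2
    by_cases hr : r = 0
    · subst hr
      rw [List.range'_one, List.flatMap_cons, List.flatMap_nil, List.append_nil]
      rw [pvPieceB]
      simp only [hci, hc, if_true, if_neg hpi]
      have hcond : (decide (i + 1 < line.length) && (line.getD (i + 1) ' ' == c) &&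
          !decide ((i + 1) ∈ paired)) = false := by
        rcases hstop with h | h | h
        · rw [decide_eq_false (show ¬ (i + 1 < line.length) by omega)]
          rw [Bool.false_and, Bool.false_and]
        · rw [beq_eq_false_iff_ne.mpr (show line.getD (i + 1) ' ' ≠ c by simpa using h)]
          rw [Bool.and_false, Bool.false_and]
        · rw [decide_eq_true (show (i + 1) ∈ paired by simpa using h)]
          rw [Bool.not_true, Bool.and_false]
      rw [hcond]
      rw [pvEmitRunA_eq]
      simp
    · have hr' : 0 < r := by omega
      rw [List.range'_succ, List.flatMap_cons]
      have hpiece : pvPieceB line paired i = [c, ' '] := by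
        rw [pvPieceB]
        simp only [hci, hc, if_true, if_neg hpi]
        have h1 : i + 1 < line.length := by omega
        have h2 : line.getD (i + 1) ' ' = c := by
          have := hrun 1 (by omega)
          simpa using this.1
        have h3 : ¬ (i + 1) ∈ paired := by
          have := hrun 1 (by omega)
          simpa using this.2
        rw [decide_eq_true h1, beq_iff_eq.mpr h2, decide_eq_false h3]
        rfl
      rw [hpiece]
      rw [ih (i + 1) hr' (by omega)
        (fun t ht => by
          have := hrun (t + 1) (by omega)
          constructor
          · have h := this.1; rwa [show i + (t + 1) = i + 1 + t from by omega] at h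
          · have h := this.2; rwa [show i + (t + 1) = i + 1 + t from by omega] at h)
        (by
          rw [show i + 1 + r = i + (r + 1) from by omega]
          exact hstop)]
      rw [pvEmitRunA_succ c r hr']

lemma pvBuildA_eq (line : List Char) (paired : PySem.Set Nat) :
    ∀ (k i : Nat), i + k = line.length →
    pvBuildA line paired i = (List.range' i k).flatMap (pvPieceB line paired) := by
  intro k
  induction k using Nat.strong_induction_on with
  | _ k ih =>
    intro i hik
    rw [pvBuildA]
    by_cases h : i < line.length
    case neg =>
      have hk0 : k = 0 := by omega
      subst hk0
      rw [dif_neg h]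
      simp
    rw [dif_pos h]
    by_cases hp : pvFmt (line.getD i ' ') && decide (i ∈ paired)
    · rw [dif_pos hp]
      obtain ⟨k, rfl⟩ : ∃ k', k = k' + 1 := ⟨k - 1, by omega⟩
      rw [List.range'_succ, List.flatMap_cons]
      have hpiece : pvPieceB line paired i = [line.getD i ' ', line.getD i ' '] := by
        rw [pvPieceB]
        rcases Bool.and_eq_true _ _ |>.mp hp with ⟨h1, h2⟩
        simp only [h1, if_true, if_pos (of_decide_eq_true h2)]
      rw [hpiece, ih k (by omega) (i + 1) (by omega)]
      rfl
    · rw [dif_neg hp]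
      by_cases hf : pvFmt (line.getD i ' ')
      · rw [dif_pos hf]
        have hnp : ¬ i ∈ paired := fun hip => hp (by rw [hf, decide_eq_true hip]; rfl)
        have hj : i < pvRunEndA line paired (line.getD i ' ') i :=
          pvRunEndA_gt line paired _ i h rfl hnp
        have hjle : pvRunEndA line paired (line.getD i ' ') i ≤ line.length :=
          pvRunEndA_le line paired _ i (by omega)
        set j := pvRunEndA line paired (line.getD i ' ') i with hjdef
        have hsplit : List.range' i k = List.range' i (j - i) ++ List.range' j (k - (j - i)) := by
          have := List.range'_append (s := i) (m := j - i) (n := k - (j - i)) (step := 1)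
          simp only [Nat.one_mul] at this
          rw [show i + (j - i) = j from by omega] at this
          rw [show (j - i) + (k - (j - i)) = k from by omega] at this
          exact this.symm
        rw [hsplit, List.flatMap_append]
        congr 1
        · refine (pvRunPieces line paired _ hf (j - i) i (by omega) (by omega) ?_ ?_).symm
          · intro t ht
            exact pvRunEndA_mem line paired _ i (i + t) (by omega) (by omega)
          · rw [show i + (j - i) = j from by omega]
            rcases pvRunEndA_stop line paired (line.getD i ' ') i with h1 | h1 | h1 | h1
            · left; exact h1
            · right; left; exact h1
            · right; right; exact h1
            · left; omega
        · exact ih (k - (j - i)) (by omega) j (by omega)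
      · rw [dif_neg hf]
        obtain ⟨k, rfl⟩ : ∃ k', k = k' + 1 := ⟨k - 1, by omega⟩
        rw [List.range'_succ, List.flatMap_cons]
        have hpiece : pvPieceB line paired i = [line.getD i ' '] := by
          simp only [pvPieceB]
          rw [if_neg hf]
        rw [hpiece, ih k (by omega) (i + 1) (by omega)]
        rfl

-- the rendering zip, indexed
lemma pvRenderZip_eq (line : List Char) :
    (List.zip line ((line.drop 1).map some ++ [none])).zipIdx
      = (List.range line.length).map (fun i => ((line.getD i ' ', pvNextO line i), i)) := by
  apply List.ext_getElem
  · simp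
    omega
  · intro i h1 h2
    have hi : i < line.length := by
      simp at h2
      exact h2
    rw [List.getElem_zipIdx, List.getElem_zip, List.getElem_map, List.getElem_range]
    refine Prod.ext (Prod.ext ?_ ?_) (by simp)
    · rw [List.getD_eq_getElem?_getD, List.getElem?_eq_getElem hi]
      simp
    · rw [List.getElem_append]
      by_cases hlt : i + 1 < line.length
      · rw [dif_pos (by simp; omega)]
        simp only [List.getElem_map, List.getElem_drop, pvNextO, if_pos hlt]
        rw [List.getD_eq_getElem?_getD, List.getElem?_eq_getElem hlt]
        simp [show 1 + i = i + 1 from by omega]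
      · rw [dif_neg (by simp; omega)]
        simp [pvNextO, hlt]

-- B's rendering fold is the flatMap of per-index pieces
lemma pvRenderB_eq (line : List Char) (paired : PySem.Set Nat) :
    pvRenderB line paired = (List.range line.length).flatMap (pvPieceB line paired) := by
  rw [pvRenderB, pvRenderZip_eq]
  have hbody : (fun (out : List Char) (w : (Char × Option Char) × Nat) =>
      if !pvFmt w.1.1 then out ++ [w.1.1]
      else if w.2 ∈ paired then out ++ [w.1.1, w.1.1]
      else (out ++ [w.1.1]) ++
        (if (w.1.2 == some w.1.1) && !decide ((w.2 + 1) ∈ paired) then [' '] else []))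
      = (fun out w => out ++
          (if !pvFmt w.1.1 then [w.1.1]
           else if w.2 ∈ paired then [w.1.1, w.1.1]
           else [w.1.1] ++
             (if (w.1.2 == some w.1.1) && !decide ((w.2 + 1) ∈ paired) then [' '] else []))) := by
    funext out w
    split_ifs <;> simp
  rw [hbody, PySem.List.foldl_append_eq_flatMap, List.nil_append, List.flatMap_map]
  congr 1
  funext i  -- pointwise: the window piece is pvPieceB
  simp only [pvPieceB, pvNextO]
  cases hf : pvFmt (line.getD i ' ')
  · simp
  · simp only [Bool.not_true, Bool.false_eq_true, if_false, if_true]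
    by_cases hm : i ∈ paired
    · rw [if_pos hm, if_pos hm]
    · rw [if_neg hm, if_neg hm]
      congr 1
      by_cases hlt : i + 1 < line.length
      · simp [hlt]
      · simp [hlt]

lemma pvProcessLine_eq (line : List Char) : pvProcessLineA line = pvProcessLineB line := by
  by_cases hline : line.isEmpty
  · rw [pvProcessLineA, if_pos hline, pvProcessLineB]
    rw [List.isEmpty_iff] at hline
    subst hline
    rfl
  · rw [pvProcessLineA, if_neg hline, pvProcessLineB, pvRenderB_eq]
    simp only
    rw [pvPaired_eq, List.range_eq_range']
    exact pvBuildA_eq line _ line.length 0 (by omega)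

-- the two code-fence loops run in lockstep (state components swapped)
lemma pvFence_eq : ∀ (lines : List (List Char)) (code : Bool) (acc : List (List Char)),
    (lines.foldl pvFenceStepA (code, acc)).2 = (lines.foldl pvFenceStepB (acc, code)).1 := by
  intro lines
  induction lines with
  | nil => intro code acc; rfl
  | cons l ls ih =>
    intro code acc
    rw [List.foldl_cons, List.foldl_cons]
    cases code <;>
      cases hs : PySem.Chars.startswith (PySem.Chars.strip l) ['`', '`', '`'] <;>
      simp only [pvFenceStepA, pvFenceStepB, hs, Bool.not_false, Bool.not_true, Bool.and_false,
        Bool.and_true, Bool.and_self, if_true, if_false, Bool.false_eq_true, pvProcessLine_eq] <;>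
      exact ih _ _

-- ===== VERDICT (by name: the statement is the Claim_ definition above) =====
theorem whatsapp_md_to_telegram_md_spec : Claim_equal_whatsapp_md_to_telegram_md := by
  intro message _
  show _ = _
  rw [whatsapp_md_to_telegram_md, whatsapp_md_to_telegram_md_alt, pvFence_eq]
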